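-- pv_equiv track=rewrite | github.com/pypi-data/pypi-mirror-272 | packages/pkscreener/pkscreener-0.44.20240507.352.tar.gz/pkscreener-0.44.20240507.352/pkscreener/classes/MenuOptions.py | allMenus
-- ===== SOURCE A (Python) =====
-- def allMenus(topLevel="X",index=12):
--     menuOptions = [topLevel]
--     indexOptions =[index]
--     scanOptions = [1,2,3,4,5,6,7,8,9,10,11,12,13,14,15,16,17,18,19,20,23,24,25,27,28]
--     scanSubOptions = {
--                         6:[1,2,3,4,5,6,{7:[1,2]},8,9],
--                         7:[1,2,{3:[1,2]},4,5,{6:[1,3]},7],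
--                         # 21:[3,5,6,7,8,9]
--                      }
--     runOptions = []
--     for menuOption in menuOptions:
--         for indexOption in indexOptions:
--             for scanOption in scanOptions:
--                 if scanOption in scanSubOptions.keys():
--                     for scanSubOption in scanSubOptions[scanOption]:
--                         if isinstance(scanSubOption, dict):
--                             for childLevelOption in scanSubOption.keys():
--                                 for value in scanSubOption[childLevelOption]:
--                                     runOption = f"{menuOption}:{indexOption}:{scanOption}:{childLevelOption}:{value}:D:D:D:D:D"
--                                     runOptions.append(runOption)
--                         else:
--                             runOption = f"{menuOption}:{indexOption}:{scanOption}:{scanSubOption}:D:D:D:D:D"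
--                             runOptions.append(runOption)
--                 else:
--                     runOption = f"{menuOption}:{indexOption}:{scanOption}:D:D:D:D:D"
--                     runOptions.append(runOption)
--     return runOptions
-- ===== SOURCE B (Python) =====
-- def allMenus(topLevel="X", index=12):
--     scanOptions = [1,2,3,4,5,6,7,8,9,10,11,12,13,14,15,16,17,18,19,20,23,24,25,27,28]
--     scanSubOptions = {
--         6:[1,2,3,4,5,6,{7:[1,2]},8,9],
--         7:[1,2,{3:[1,2]},4,5,{6:[1,3]},7],
--     }
--
--     def flatten(node):
--         # flatten one sub-option entry to a list of numeric paths
--         if isinstance(node, dict):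
--             return [[k, v] for k, vs in node.items() for v in vs]
--         return [[node]]
--
--     paths = []
--     for s in scanOptions:
--         if s in scanSubOptions:
--             for item in scanSubOptions[s]:
--                 for rest in flatten(item):
--                     paths.append([s] + rest)
--         else:
--             paths.append([s])
--     prefix = f"{topLevel}:{index}:"
--     return [prefix + ":".join(map(str, p)) + ":D" * 5 for p in paths]
-- ===== Notes on version B (the rewrite author's own statement) =====
-- stated objective: simpler
-- what changed: Replaces the five-deep nested loops over singleton menu/index lists and inline string formatting with a two-phase decomposition: flatten the nested sub-option data into numeric paths, then render every path with one comprehension (join + constant ':D'*5 padding).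
import Mathlib
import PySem

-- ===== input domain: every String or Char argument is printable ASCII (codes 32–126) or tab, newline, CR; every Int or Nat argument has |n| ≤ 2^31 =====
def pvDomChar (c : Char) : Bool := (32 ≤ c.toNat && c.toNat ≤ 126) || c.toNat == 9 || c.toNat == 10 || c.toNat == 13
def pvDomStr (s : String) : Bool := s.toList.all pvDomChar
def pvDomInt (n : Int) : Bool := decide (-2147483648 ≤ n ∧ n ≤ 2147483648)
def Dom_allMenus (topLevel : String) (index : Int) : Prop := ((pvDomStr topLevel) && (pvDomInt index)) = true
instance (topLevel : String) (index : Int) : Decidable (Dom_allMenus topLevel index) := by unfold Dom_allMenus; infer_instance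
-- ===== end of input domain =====

-- B is a simpler decomposition: flatten the nested sub-option data into numeric paths, then render each path once.

-- sub-option entry: either a plain number or a nested dict of number → numbers
inductive SubItem
  | num : Int → SubItem
  | sub : List (Int × List Int) → SubItem
deriving Repr, DecidableEq

-- ===== PORT A =====
def scanOptionsConst : List Int := [1,2,3,4,5,6,7,8,9,10,11,12,13,14,15,16,17,18,19,20,23,24,25,27,28]

def scanSubOptionsConst : PySem.Dict Int (List SubItem) :=
  PySem.Dict.ofList
    [(6, [.num 1, .num 2, .num 3, .num 4, .num 5, .num 6, .sub [(7, [1,2])], .num 8, .num 9]),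
     (7, [.num 1, .num 2, .sub [(3, [1,2])], .num 4, .num 5, .sub [(6, [1,3])], .num 7])]

def allMenus (topLevel : String) (index : Int) : List String :=
  let menuOptions := [topLevel]
  let indexOptions := [index]
  menuOptions.foldl (fun acc menuOption =>
    indexOptions.foldl (fun acc indexOption =>
      scanOptionsConst.foldl (fun acc scanOption =>
        match scanSubOptionsConst.get? scanOption with
        | some subs =>
          subs.foldl (fun acc scanSubOption =>
            match scanSubOption with
            | .sub pairs =>
              pairs.foldl (fun acc kv =>
                kv.2.foldl (fun acc v =>
                  acc ++ [menuOption ++ ":" ++ PySem.Int.toStr indexOption ++ ":" ++ PySem.Int.toStr scanOption ++ ":" ++ PySem.Int.toStr kv.1 ++ ":" ++ PySem.Int.toStr v ++ ":D:D:D:D:D"]) acc) acc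
            | .num n =>
              acc ++ [menuOption ++ ":" ++ PySem.Int.toStr indexOption ++ ":" ++ PySem.Int.toStr scanOption ++ ":" ++ PySem.Int.toStr n ++ ":D:D:D:D:D"]) acc
        | none =>
          acc ++ [menuOption ++ ":" ++ PySem.Int.toStr indexOption ++ ":" ++ PySem.Int.toStr scanOption ++ ":D:D:D:D:D"]) acc) acc) []

-- ===== PORT B =====
def flattenB : SubItem → List (List Int)
  | .sub pairs => pairs.flatMap (fun kv => kv.2.map (fun v => [kv.1, v]))
  | .num n => [[n]]

def allMenus_alt (topLevel : String) (index : Int) : List String :=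
  let paths : List (List Int) :=
    scanOptionsConst.flatMap (fun s =>
      match scanSubOptionsConst.get? s with
      | some items => items.flatMap (fun item => (flattenB item).map (fun rest => s :: rest))
      | none => [[s]])
  let pref := topLevel ++ ":" ++ PySem.Int.toStr index ++ ":"
  paths.map (fun p => pref ++ PySem.Str.join ":" (p.map PySem.Int.toStr) ++ ":D:D:D:D:D")

-- ===== PRECONDITION & SPEC =====
def Spec_allMenus (topLevel : String) (index : Int) (out : List String) : Prop := out = allMenus_alt topLevel index
instance (topLevel : String) (index : Int) (out : List String) : Decidable (Spec_allMenus topLevel index out) := by unfold Spec_allMenus; infer_instance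

-- ===== CLAIM (what is proved, stated in full; the proofs are below) =====
def Claim_equal_allMenus : Prop := ∀ (topLevel : String) (index : Int), Dom_allMenus topLevel index → Spec_allMenus topLevel index (allMenus topLevel index)

-- ===== LEMMAS AND PROOFS =====
theorem get6 : scanSubOptionsConst.get? 6 =
    some [.num 1, .num 2, .num 3, .num 4, .num 5, .num 6, .sub [(7, [1,2])], .num 8, .num 9] := by rfl

theorem get7 : scanSubOptionsConst.get? 7 =
    some [.num 1, .num 2, .sub [(3, [1,2])], .num 4, .num 5, .sub [(6, [1,3])], .num 7] := by rfl

theorem getN1 : scanSubOptionsConst.get? 1 = none := by rfl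
theorem getN2 : scanSubOptionsConst.get? 2 = none := by rfl
theorem getN3 : scanSubOptionsConst.get? 3 = none := by rfl
theorem getN4 : scanSubOptionsConst.get? 4 = none := by rfl
theorem getN5 : scanSubOptionsConst.get? 5 = none := by rfl
theorem getN8 : scanSubOptionsConst.get? 8 = none := by rfl
theorem getN9 : scanSubOptionsConst.get? 9 = none := by rfl
theorem getN10 : scanSubOptionsConst.get? 10 = none := by rfl
theorem getN11 : scanSubOptionsConst.get? 11 = none := by rfl
theorem getN12 : scanSubOptionsConst.get? 12 = none := by rfl
theorem getN13 : scanSubOptionsConst.get? 13 = none := by rfl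
theorem getN14 : scanSubOptionsConst.get? 14 = none := by rfl
theorem getN15 : scanSubOptionsConst.get? 15 = none := by rfl
theorem getN16 : scanSubOptionsConst.get? 16 = none := by rfl
theorem getN17 : scanSubOptionsConst.get? 17 = none := by rfl
theorem getN18 : scanSubOptionsConst.get? 18 = none := by rfl
theorem getN19 : scanSubOptionsConst.get? 19 = none := by rfl
theorem getN20 : scanSubOptionsConst.get? 20 = none := by rfl
theorem getN23 : scanSubOptionsConst.get? 23 = none := by rfl
theorem getN24 : scanSubOptionsConst.get? 24 = none := by rfl
theorem getN25 : scanSubOptionsConst.get? 25 = none := by rfl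
theorem getN27 : scanSubOptionsConst.get? 27 = none := by rfl
theorem getN28 : scanSubOptionsConst.get? 28 = none := by rfl

theorem allMenus_eq_alt (topLevel : String) (index : Int) :
    allMenus topLevel index = allMenus_alt topLevel index := by
  simp only [allMenus, allMenus_alt, scanOptionsConst, flattenB,
    List.foldl, List.flatMap, List.map, List.flatten,
    get6, get7, getN1, getN2, getN3, getN4, getN5, getN8, getN9, getN10, getN11, getN12, getN13, getN14, getN15, getN16, getN17, getN18, getN19, getN20, getN23, getN24, getN25, getN27, getN28]
  simp [PySem.Str.join, String.append_assoc]
  decide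

-- ===== VERDICT (by name: the statement is the Claim_ definition above) =====
theorem allMenus_spec : Claim_equal_allMenus := by
  intro topLevel index _
  exact allMenus_eq_alt topLevel index
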